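-- pv_equiv track=rewrite | github.com/ReneGRomCodes/FCC_daily_coding_challenges | 12-25/07-12-25 String Compression.py | compress_string_alternative
-- ===== SOURCE A (Python) =====
-- def compress_string_alternative(sentence: str) -> str:
--     """More thorough solution to the challenge which takes non-consecutive duplicates into account."""
--     words: list[str] = sentence.split()
--     result: list[str] = []
--     current: str = words[0]
--     count: int = 1
--
--     for word in words[1:]:
--         if word == current:
--             count += 1
--         else:
--             if count > 1:
--                 result.append(f"{current}({count})")
--             else:
--                 result.append(current)
--             current = word
--             count = 1
--
--     # Handle the last word/run.
--     if count > 1: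
--         result.append(f"{current}({count})")
--     else:
--         result.append(current)
--
--     return " ".join(result)
-- ===== SOURCE B (Python) =====
-- def compress_string_alternative(sentence: str) -> str:
--     words = sentence.split()
--     parts = []
--     i = 0
--     while i < len(words):
--         j = i
--         while j < len(words) and words[j] == words[i]:
--             j += 1
--         n = j - i
--         parts.append(f"{words[i]}({n})" if n > 1 else words[i])
--         i = j
--     return " ".join(parts)
-- ===== Notes on version B (the rewrite author's own statement) =====
-- stated objective: alternative
-- what changed: Replaces A's single pass with carried current/count state and a post-loop flush by a two-pointer scan that finds each run's end and emits its token inside the loop, with no trailing special case.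
-- crash fix: On whitespace-only input (split() empty) A raises IndexError at words[0]; B returns "". — e.g. on compress_string_alternative(" "): A raises IndexError, B returns ""
import Mathlib
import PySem

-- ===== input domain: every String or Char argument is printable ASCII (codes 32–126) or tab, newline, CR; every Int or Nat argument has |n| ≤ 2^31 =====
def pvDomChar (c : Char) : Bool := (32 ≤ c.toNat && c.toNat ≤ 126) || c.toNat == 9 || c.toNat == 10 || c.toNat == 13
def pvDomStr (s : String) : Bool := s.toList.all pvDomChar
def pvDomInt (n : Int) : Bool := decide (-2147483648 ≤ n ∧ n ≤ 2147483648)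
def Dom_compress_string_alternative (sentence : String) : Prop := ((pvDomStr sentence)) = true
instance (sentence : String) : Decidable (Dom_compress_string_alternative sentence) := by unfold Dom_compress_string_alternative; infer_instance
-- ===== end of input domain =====

-- B replaces A's carried current/count state and post-loop flush by a per-run two-pointer scan (alternative decomposition, same cost).

-- ===== PORT A =====
-- f"{c}({k})" / the plain word, exactly as A appends it
def pvEmit (c : String) (k : Int) : String :=
  if k > 1 then c ++ "(" ++ PySem.Int.toStr k ++ ")" else c

-- A's loop body, verbatim
def pvStepA (acc : List String × String × Int) (word : String) : List String × String × Int :=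
  let (result, current, count) := acc
  if word == current then (result, current, count + 1)
  else (result ++ [pvEmit current count], word, 1)

def compress_string_alternative (sentence : String) : String :=
  match PySem.Str.split₀ sentence with
  | [] => ""   -- unreachable under Pre_: Python raises IndexError at words[0]
  | w :: rest =>
    let st := rest.foldl pvStepA ([], w, 1)
    PySem.Str.join " " (st.1 ++ [pvEmit st.2.1 st.2.2])

-- ===== PORT B =====
-- B's inner `while words[j] == words[i]` scan = takeWhile; advancing i to j = dropWhile
def pvRuns : List String → List String
  | [] => []
  | w :: rest =>
    let run := rest.takeWhile (· == w)
    let n : Int := (run.length : Int) + 1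
    pvEmit w n :: pvRuns (rest.dropWhile (· == w))
  termination_by ws => ws.length
  decreasing_by
    simp only [List.length_cons]
    exact Nat.lt_succ_of_le (List.length_dropWhile_le _ _)

def compress_string_alternative_alt (sentence : String) : String :=
  PySem.Str.join " " (pvRuns (PySem.Str.split₀ sentence))

-- ===== PRECONDITION & SPEC =====
-- Pre_ excludes exactly the inputs whose split() is empty: there Python A raises IndexError at words[0].
def Pre_compress_string_alternative (sentence : String) : Prop :=
  PySem.Str.split₀ sentence ≠ []
instance (sentence : String) : Decidable (Pre_compress_string_alternative sentence) := by
  unfold Pre_compress_string_alternative; infer_instance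

def pvWitness_compress_string_alternative : String := "a a b"

-- On whitespace-only input (split() empty) A raises IndexError at words[0]; B returns "".
def Raises_compress_string_alternative (sentence : String) : Prop :=
  PySem.Str.split₀ sentence = []
instance (sentence : String) : Decidable (Raises_compress_string_alternative sentence) := by
  unfold Raises_compress_string_alternative; infer_instance
def pvRaiseWitness_compress_string_alternative : String := " "
def pvRaiseWitnessOut_compress_string_alternative : String := ""

def Spec_compress_string_alternative (sentence : String) (out : String) : Prop :=
  out = compress_string_alternative_alt sentence
instance (sentence : String) (out : String) : Decidable (Spec_compress_string_alternative sentence out) := by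
  unfold Spec_compress_string_alternative; infer_instance

-- ===== CLAIM (what is proved, stated in full; the proofs are below) =====
def Claim_equal_compress_string_alternative : Prop :=
  ∀ (sentence : String), Dom_compress_string_alternative sentence →
    Pre_compress_string_alternative sentence →
    Spec_compress_string_alternative sentence (compress_string_alternative sentence)

def Claim_raises_compress_string_alternative : Prop :=
  (∀ (sentence : String), Dom_compress_string_alternative sentence →
      Raises_compress_string_alternative sentence → ¬ Pre_compress_string_alternative sentence) ∧
  (Dom_compress_string_alternative (pvRaiseWitness_compress_string_alternative) ∧
   Raises_compress_string_alternative (pvRaiseWitness_compress_string_alternative) ∧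
   compress_string_alternative_alt (pvRaiseWitness_compress_string_alternative) =
     pvRaiseWitnessOut_compress_string_alternative)

-- ===== LEMMAS AND PROOFS =====

-- Invariant of A's loop: the flushed fold from (result, current, count) equals result,
-- then the emitted run of current (extended by ws's leading run of current),
-- then B's runs of the remainder.
theorem pv_fold_runs (ws : List String) (result : List String) (current : String) (count : Int)
    (h : 1 ≤ count) :
    (ws.foldl pvStepA (result, current, count)).1 ++
      [pvEmit (ws.foldl pvStepA (result, current, count)).2.1
              (ws.foldl pvStepA (result, current, count)).2.2] =
    result ++ pvEmit current (count + ((ws.takeWhile (· == current)).length : Int))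
      :: pvRuns (ws.dropWhile (· == current)) := by
  induction ws generalizing result current count with
  | nil => simp [pvRuns]
  | cons w ws ih =>
    by_cases hw : (w == current) = true
    · simp only [List.foldl_cons, pvStepA, hw, List.takeWhile_cons, List.dropWhile_cons, if_true]
      rw [ih _ _ _ (by omega)]
      simp only [List.length_cons]
      congr 3
      push_cast; ring
    · simp only [List.foldl_cons, pvStepA, hw, List.takeWhile_cons, List.dropWhile_cons,
        Bool.false_eq_true, if_false]
      rw [ih _ _ _ (by omega)]
      rw [pvRuns]
      simp only [List.length_nil, Int.natCast_zero, add_zero,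
        List.append_assoc, List.singleton_append]
      have hc : (1 : Int) + ((ws.takeWhile (· == w)).length : Int)
          = ((ws.takeWhile (· == w)).length : Int) + 1 := by ring
      rw [hc]

-- ===== VERDICT (by name: the statement is the Claim_ definition above) =====
theorem compress_string_alternative_spec : Claim_equal_compress_string_alternative := by
  intro sentence _ hpre
  unfold Spec_compress_string_alternative compress_string_alternative compress_string_alternative_alt
  unfold Pre_compress_string_alternative at hpre
  cases hws : PySem.Str.split₀ sentence with
  | nil => exact absurd hws hpre
  | cons w rest =>
    simp only
    rw [pv_fold_runs rest [] w 1 (le_refl 1)]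
    rw [pvRuns]
    have h1 : (1 : Int) + ((rest.takeWhile (· == w)).length : Int)
        = ((rest.takeWhile (· == w)).length : Int) + 1 := by ring
    rw [h1]
    simp only [List.nil_append]

theorem compress_string_alternative_raises : Claim_raises_compress_string_alternative := by
  unfold Claim_raises_compress_string_alternative
  refine ⟨?_, by decide, by decide, ?_⟩
  · intro s _ hr
    unfold Pre_compress_string_alternative Raises_compress_string_alternative at *
    simp [hr]
  · unfold compress_string_alternative_alt pvRaiseWitness_compress_string_alternative
    rw [show PySem.Str.split₀ " " = [] from by decide]
    rw [pvRuns]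
    decide

-- self-check: the raises theorem indeed gives B's value at the raise witness
theorem compress_string_alternative_raises_witness_ok :
    compress_string_alternative_alt pvRaiseWitness_compress_string_alternative =
      pvRaiseWitnessOut_compress_string_alternative := by
  have h := compress_string_alternative_raises
  unfold Claim_raises_compress_string_alternative at h
  exact h.2.2.2
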